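-- pv_equiv track=rewrite | github.com/davidrot96/From-Nand-to-Tetris | ex06_nand/Main.py | stepOne
-- ===== SOURCE A (Python) =====
-- def stepOne(lines, ourDict):
--     """
--     :param lines: the current line in the file
--     :param ourDict: the dict of the base label
--     :return: the function dose not return anything
--     """
--     counter = 0
--     indexLine = 0
--     newString = lines.copy()
--     for line in lines:
--         newLine = line.replace(" ", "")
--         newString[indexLine] = newLine
--         if newLine == '\n' or newLine == "" or newLine[0:2] == "//":
--             newString.remove(newLine)
--             continue
--         if "//" in newLine:
--             newString[indexLine] = newLine.split('//')[0]
--         if newLine[0:1] == '(':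
--             ourDict[newLine.split(')')[0][1::]] = counter
--             indexLine += 1
--         else:
--             indexLine += 1
--             counter += 1
--     return newString
-- ===== SOURCE B (Python) =====
-- def stepOne(lines, ourDict):
--     """Two-pass form: pass 1 builds the cleaned line list (spaces removed,
--     inline comments stripped, blank/whitespace-only/comment-only lines dropped);
--     pass 2 scans the cleaned list to record label addresses into ourDict.
--     Like A it mutates ourDict; equivalence is about the return value."""
--     cleaned = []
--     for line in lines:
--         s = line.replace(" ", "")
--         if "//" in s:
--             s = s.split("//")[0]
--         if s == "" or s.isspace():
--             continue
--         cleaned.append(s)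
--     counter = 0
--     for s in cleaned:
--         if s[0:1] == '(':
--             ourDict[s.split(')')[0][1:]] = counter
--         else:
--             counter += 1
--     return cleaned
-- ===== Notes on version B (the rewrite author's own statement) =====
-- stated objective: simpler
-- what changed: B replaces A's in-place editing of a copied list (index bookkeeping plus list.remove of the current value) by the classic two-pass form: pass 1 appends each cleaned kept line to a fresh list, pass 2 scans that list to fill the label dict; no copy, no remove, no indexLine.
-- intended difference: On lines that reduce to non-empty whitespace (e.g. '\t', '\r\n', or the '\n' left of a '\n//comment'), A's blank test (exactly '' or '\n') misses them, so A keeps a spurious whitespace entry in the output (possibly even migrated by its buggy list.remove); B drops every blank/whitespace-only/comment-only line, which is the intended cleaned instruction list. — e.g. on stepOne(["\t"], []): A returns ["\t"], B returns []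
import Mathlib
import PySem

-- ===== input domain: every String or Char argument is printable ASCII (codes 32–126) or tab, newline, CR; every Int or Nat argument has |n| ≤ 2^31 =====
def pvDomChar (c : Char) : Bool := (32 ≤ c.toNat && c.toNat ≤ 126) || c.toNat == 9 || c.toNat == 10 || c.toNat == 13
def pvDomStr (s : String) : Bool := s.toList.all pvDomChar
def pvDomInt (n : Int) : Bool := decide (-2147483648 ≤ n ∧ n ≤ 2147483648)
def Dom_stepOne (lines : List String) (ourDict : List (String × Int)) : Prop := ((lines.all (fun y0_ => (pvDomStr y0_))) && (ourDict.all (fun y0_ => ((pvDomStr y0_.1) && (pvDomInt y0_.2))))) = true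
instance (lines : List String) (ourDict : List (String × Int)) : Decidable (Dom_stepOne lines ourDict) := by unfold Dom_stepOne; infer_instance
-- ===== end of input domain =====

-- B is the classic two-pass cleaner (append kept cleaned lines to a fresh list, then scan it for
-- labels) instead of A's in-place edit of a copied list; equivalence is about the RETURN value
-- only (both mutate ourDict, which is not part of the return).

-- ===== PORT A =====
-- A's loop state: counter, indexLine, the in-place edited list newString, and the dict.
-- newString[indexLine] = v is ported with pySetD and list.remove with remove?;
-- both are total forms: in A the index is always in range and the removed value is
-- always present (it was just written at position indexLine), so Python never raises.
def stepOneLoop (rem : List String) (counter indexLine : Int)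
    (newString : List String) (d : PySem.Dict String Int) : List String :=
  match rem with
  | [] => newString
  | line :: rest =>
    let newLine := PySem.Str.replace line " " ""
    let ns1 := PySem.List.pySetD newString indexLine newLine
    if newLine == "\n" || newLine == "" || PySem.Str.slice newLine (some 0) (some 2) == "//" then
      stepOneLoop rest counter indexLine ((PySem.List.remove? ns1 newLine).getD ns1) d
    else
      let ns2 := if PySem.Str.isIn "//" newLine then
          PySem.List.pySetD ns1 indexLine (((PySem.Str.split? newLine "//").getD []).headD "")
        else ns1
      if PySem.Str.slice newLine (some 0) (some 1) == "(" then
        stepOneLoop rest counter (indexLine + 1) ns2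
          (d.insert (PySem.Str.slice (((PySem.Str.split? newLine ")").getD []).headD "") (some 1) none) counter)
      else
        stepOneLoop rest (counter + 1) (indexLine + 1) ns2 d

def stepOne (lines : List String) (ourDict : List (String × Int)) : List String :=
  stepOneLoop lines 0 0 lines ⟨ourDict⟩

-- ===== PORT B =====
def stepOne_alt (lines : List String) (ourDict : List (String × Int)) : List String :=
  -- pass 1: append each cleaned kept line to a fresh list
  let cleaned := lines.foldl (fun out line =>
    let s := PySem.Str.replace line " " ""
    let s := if PySem.Str.isIn "//" s then ((PySem.Str.split? s "//").getD []).headD "" else s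
    if s == "" || PySem.Str.strIsspace s then out else out ++ [s]) []
  -- pass 2: record label addresses into the dict (a side effect in Python; not part of the return)
  let _pass2 := cleaned.foldl (fun (st : PySem.Dict String Int × Int) s =>
    if PySem.Str.slice s (some 0) (some 1) == "(" then
      (st.1.insert (PySem.Str.slice (((PySem.Str.split? s ")").getD []).headD "") (some 1) none) st.2, st.2)
    else (st.1, st.2 + 1)) (⟨ourDict⟩, 0)
  cleaned

-- ===== PRECONDITION & SPEC =====

-- On lines that reduce to non-empty whitespace (e.g. "\t", "\r\n", or the "\n" left of a
-- "\n//comment"), A's blank test (exactly "" or "\n") misses them, so A keeps a spurious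
-- whitespace entry in the output (possibly even migrated by its buggy list.remove); B drops
-- every blank/whitespace-only/comment-only line, which is the intended cleaned instruction list.
-- (Some line, with its spaces removed, is neither blank (exactly "" or "\n") nor a whole-line
-- comment, yet everything on it up to an optional "//" comment is whitespace.)
def D_stepOne (lines : List String) (ourDict : List (String × Int)) : Prop :=
  ∃ l ∈ lines,
    let c := l.toList.filter (fun ch => !(ch == ' '))
    c ≠ [] ∧ c ≠ ['\n'] ∧ ¬ ['/', '/'] <+: c ∧
      (c.dropWhile PySem.Chars.isspace = [] ∨ ['/', '/'] <+: c.dropWhile PySem.Chars.isspace)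
instance (lines : List String) (ourDict : List (String × Int)) : Decidable (D_stepOne lines ourDict) := by
  unfold D_stepOne; infer_instance

def Spec_stepOne (lines : List String) (ourDict : List (String × Int)) (out : List String) : Prop :=
  ¬ D_stepOne lines ourDict → out = stepOne_alt lines ourDict
instance (lines : List String) (ourDict : List (String × Int)) (out : List String) : Decidable (Spec_stepOne lines ourDict out) := by
  unfold Spec_stepOne; infer_instance

def pvDiffWitness_stepOne : List String × (List (String × Int)) := (["\t"], [])
def pvDiffWitnessOut_stepOne : (List String) × (List String) := (["\t"], [])

-- ===== CLAIM (what is proved, stated in full; the proofs are below) =====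
def Claim_unchanged_stepOne : Prop := ∀ (lines : List String) (ourDict : List (String × Int)), Dom_stepOne lines ourDict → Spec_stepOne lines ourDict (stepOne lines ourDict)
def Claim_changed_stepOne : Prop := Dom_stepOne (pvDiffWitness_stepOne.1) (pvDiffWitness_stepOne.2) ∧ D_stepOne (pvDiffWitness_stepOne.1) (pvDiffWitness_stepOne.2) ∧ stepOne (pvDiffWitness_stepOne.1) (pvDiffWitness_stepOne.2) = pvDiffWitnessOut_stepOne.1 ∧ stepOne_alt (pvDiffWitness_stepOne.1) (pvDiffWitness_stepOne.2) = pvDiffWitnessOut_stepOne.2 ∧ pvDiffWitnessOut_stepOne.1 ≠ pvDiffWitnessOut_stepOne.2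
def Claim_exact_stepOne : Prop := ∀ (lines : List String) (ourDict : List (String × Int)), Dom_stepOne lines ourDict → D_stepOne lines ourDict → stepOne lines ourDict ≠ stepOne_alt lines ourDict

-- ===== LEMMAS AND PROOFS =====

-- per-line views of the input as the ports compute them (proof-side only)
def pvClean (s : String) : String := PySem.Str.replace s " " ""      -- the line with spaces removed
def pvSkipB (s : String) : Bool :=                                   -- A's skip test on the line
  pvClean s == "\n" || pvClean s == "" || PySem.Str.slice (pvClean s) (some 0) (some 2) == "//"
def pvValF (s : String) : String :=                                  -- the comment-stripped value
  if PySem.Str.isIn "//" (pvClean s) then ((PySem.Str.split? (pvClean s) "//").getD []).headD ""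
  else pvClean s
def pvJunk (s : String) : Bool := !pvSkipB s && PySem.Str.strIsspace (pvValF s)
def pvTU (sep : List Char) : List Char → List Char       -- the characters before the first sep
  | [] => []
  | c :: rest => if sep.isPrefixOf (c :: rest) then [] else c :: pvTU sep rest

lemma pvTU_prefix (sep l : List Char) : pvTU sep l <+: l := by
  induction l with
  | nil => simp [pvTU]
  | cons c r ih =>
    simp only [pvTU]
    split
    · exact List.nil_prefix
    · exact (List.prefix_cons_inj c).mpr ih

lemma pvTU_not_prefix (sep : List Char) (_hsep : sep ≠ []) (l : List Char) :
    ¬ sep <+: pvTU sep l := by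
  cases l with
  | nil => simpa [pvTU, List.prefix_nil]
  | cons c r =>
    simp only [pvTU]
    split
    · simpa [List.prefix_nil]
    · rename_i hnp
      intro hp
      exact hnp (List.isPrefixOf_iff_prefix.mpr
        (hp.trans ((List.prefix_cons_inj c).mpr (pvTU_prefix sep r))))

lemma pvTU_nil_of_prefix (sep l : List Char) (hsep : sep ≠ []) (h : sep <+: l) :
    pvTU sep l = [] := by
  cases l with
  | nil => rfl
  | cons c r => simp [pvTU, List.isPrefixOf_iff_prefix.mpr h]

lemma pvGoAcc (sep : List Char) (fuel : Nat) : ∀ (l cur : List Char) (accs : List (List Char)),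
    PySem.Chars.splitOn.go sep fuel l cur accs =
      accs.reverse ++ PySem.Chars.splitOn.go sep fuel l cur [] := by
  induction fuel with
  | zero => intro l cur accs; simp [PySem.Chars.splitOn.go]
  | succ f ih =>
    intro l cur accs
    cases l with
    | nil => simp [PySem.Chars.splitOn.go]
    | cons c r =>
      simp only [PySem.Chars.splitOn.go]
      split
      · rw [ih _ _ (cur.reverse :: accs), ih _ _ [cur.reverse]]
        simp
      · rw [ih _ _ accs]

lemma pvGoHead (sep : List Char) (fuel : Nat) :
    ∀ (l cur : List Char), l.length < fuel →
    ∃ rest, PySem.Chars.splitOn.go sep fuel l cur [] = (cur.reverse ++ pvTU sep l) :: rest := by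
  induction fuel with
  | zero => intro l cur h; omega
  | succ f ih =>
    intro l cur h
    cases l with
    | nil => exact ⟨[], by simp [PySem.Chars.splitOn.go, pvTU]⟩
    | cons c r =>
      simp only [PySem.Chars.splitOn.go, pvTU]
      split
      · rename_i hp
        rw [pvGoAcc sep f _ [] [cur.reverse]]
        refine ⟨PySem.Chars.splitOn.go sep f (List.drop sep.length (c :: r)) [] [], ?_⟩
        simp
      · rename_i hp
        obtain ⟨rest, hrest⟩ := ih r (c :: cur) (by simpa using Nat.lt_of_succ_lt_succ h)
        exact ⟨rest, by simp [hrest]⟩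

lemma pvSplitOn_head (sep : List Char) (l : List Char) :
    ∃ rest, PySem.Chars.splitOn l sep = pvTU sep l :: rest := by
  obtain ⟨rest, h⟩ := pvGoHead sep (l.length + 1) l [] (by omega)
  exact ⟨rest, by simpa [PySem.Chars.splitOn] using h⟩

lemma pvTU_eq_nil (sep l : List Char) (h : pvTU sep l = []) :
    l = [] ∨ sep.isPrefixOf l = true := by
  cases l with
  | nil => exact Or.inl rfl
  | cons c r =>
    simp only [pvTU] at h
    split at h
    · right; assumption
    · simp at h

lemma pvSlice2_iff (s : String) :
    (PySem.Str.slice s (some 0) (some 2) == "//") = true ↔ "//".toList <+: s.toList := by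
  rw [beq_iff_eq, ← String.toList_inj]
  simp only [PySem.Str.toList_slice, PySem.Chars.slice_eq_listSlice]
  rw [show ((2:Int) = ((2:Nat):Int)) by norm_num, PySem.List.slice_zero_start,
    PySem.List.slice_to_natCast]
  constructor
  · intro h; rw [List.prefix_iff_eq_take, ← h]; simp
  · intro h; rw [List.prefix_iff_eq_take] at h; exact h.symm

lemma pvSplit_head_toList (c : String) :
    (((PySem.Str.split? c "//").getD []).headD "").toList = pvTU "//".toList c.toList := by
  obtain ⟨rest, h⟩ := pvSplitOn_head "//".toList c.toList
  simp only [PySem.Str.split?, PySem.Chars.split?,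
    show ("//".toList).isEmpty = false from rfl, Bool.false_eq_true, if_false,
    Option.map_some, Option.getD_some, h]
  simp

-- the stored value of a line, on the character level
lemma pvValF_toList (s : String) :
    (pvValF s).toList =
      (if PySem.Chars.isIn "//".toList (pvClean s).toList then pvTU "//".toList (pvClean s).toList
       else (pvClean s).toList) := by
  rw [pvValF, PySem.Str.isIn_eq]
  split
  · exact pvSplit_head_toList (pvClean s)
  · rfl

lemma pvValF_facts (s : String) (hk : pvSkipB s = false) :
    (pvValF s).toList ≠ [] ∧ ¬ ("//".toList <+: (pvValF s).toList) := by
  simp only [pvSkipB, Bool.or_eq_false_iff, beq_eq_false_iff_ne, ne_eq] at hk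
  obtain ⟨⟨hnl, hne⟩, hsl⟩ := hk
  have hnp : ¬ "//".toList <+: (pvClean s).toList := fun h =>
    absurd ((pvSlice2_iff (pvClean s)).mpr h) (by simp [hsl])
  rw [pvValF_toList]
  split
  · refine ⟨fun h => ?_, pvTU_not_prefix _ (by simp) _⟩
    rcases pvTU_eq_nil _ _ h with h' | h'
    · exact hne (String.toList_injective (by simpa using h'))
    · exact hnp (List.isPrefixOf_iff_prefix.mp h')
  · rename_i hin
    refine ⟨fun h => hne (String.toList_injective (by simpa using h)), fun h => hin ?_⟩
    exact (PySem.Chars.isIn_iff_infix _ _).mpr (h.isInfix)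

-- space removal is a character filter
lemma pvReplace_go_filter (fuel : Nat) : ∀ (l acc : List Char), l.length ≤ fuel →
    PySem.Chars.replace.go [' '] [] fuel l acc =
      acc.reverse ++ l.filter (fun ch => !(ch == ' ')) := by
  induction fuel with
  | zero =>
    intro l acc h
    rw [Nat.le_zero] at h
    rw [List.length_eq_zero_iff.mp h]
    simp [PySem.Chars.replace.go]
  | succ f ih =>
    intro l acc h
    cases l with
    | nil => simp [PySem.Chars.replace.go]
    | cons c t =>
      rw [show PySem.Chars.replace.go [' '] [] (f + 1) (c :: t) acc =
          (if [' '].isPrefixOf (c :: t) = true then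
            PySem.Chars.replace.go [' '] [] f (List.drop ([' '] : List Char).length (c :: t))
              (([] : List Char).reverse ++ acc)
          else PySem.Chars.replace.go [' '] [] f t (c :: acc)) from rfl]
      have hpre : ([' '].isPrefixOf (c :: t)) = (' ' == c) := by simp [List.isPrefixOf]
      by_cases hcs : c = ' '
      · rw [if_pos (by rw [hpre, hcs]; exact beq_self_eq_true ' ')]
        simp only [List.length_cons, List.length_nil, List.drop_succ_cons, List.drop_zero,
          List.reverse_nil, List.nil_append]
        rw [ih t acc (by simpa using h), List.filter_cons_of_neg (by simp [hcs])]
      · rw [if_neg (by rw [hpre, beq_eq_false_iff_ne.mpr (fun he => hcs he.symm)]; exact Bool.false_ne_true)]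
        rw [ih t (c :: acc) (by simpa using h), List.filter_cons_of_pos (by simpa using hcs)]
        simp

lemma pvFilter_eq (s : String) :
    s.toList.filter (fun ch => !(ch == ' ')) = (pvClean s).toList := by
  rw [pvClean, PySem.Str.toList_replace,
    show (" " : String).toList = [' '] from rfl, show ("" : String).toList = ([] : List Char) from rfl,
    PySem.Chars.replace, if_neg (by decide), pvReplace_go_filter s.toList.length s.toList [] le_rfl]
  rfl

lemma pvTU_self_of_not_infix (sep l : List Char) (h : ¬ sep <:+: l) : pvTU sep l = l := by
  induction l with
  | nil => rfl
  | cons c r ih =>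
    rw [pvTU, if_neg (fun hp => h (List.isPrefixOf_iff_prefix.mp hp).isInfix),
      ih (fun hi => h (List.infix_cons hi))]

-- the stored value is always the character prefix before the first "//"
lemma pvValF_TU (s : String) : (pvValF s).toList = pvTU ['/', '/'] (pvClean s).toList := by
  rw [pvValF_toList, show ("//" : String).toList = ['/', '/'] from rfl]
  split
  · rfl
  · rename_i hin
    exact (pvTU_self_of_not_infix _ _ (PySem.Chars.isIn_eq_false_iff _ _ |>.mp
      (by simpa using hin))).symm

-- A's skip test, decomposed on the character level
lemma pvSkip_false_iff (s : String) :
    pvSkipB s = false ↔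
      ((pvClean s).toList ≠ [] ∧ (pvClean s).toList ≠ ['\n'] ∧
        ¬ ['/', '/'] <+: (pvClean s).toList) := by
  rw [pvSkipB, Bool.or_eq_false_iff, Bool.or_eq_false_iff]
  constructor
  · rintro ⟨⟨h1, h2⟩, h3⟩
    refine ⟨fun he => ?_, fun he => ?_, fun hp => ?_⟩
    · exact absurd (beq_iff_eq.mpr (String.toList_injective (s₂ := "") (by rw [he]; decide))) (by simp [h2])
    · exact absurd (beq_iff_eq.mpr (String.toList_injective (s₂ := "\n") (by rw [he]; decide))) (by simp [h1])
    · exact absurd ((pvSlice2_iff _).mpr hp) (by simp [h3])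
  · rintro ⟨h1, h2, h3⟩
    refine ⟨⟨?_, ?_⟩, ?_⟩
    · exact beq_eq_false_iff_ne.mpr (fun he => h2 (by rw [he]; rfl))
    · exact beq_eq_false_iff_ne.mpr (fun he => h1 (by rw [he]; rfl))
    · rcases hb : (PySem.Str.slice (pvClean s) (some 0) (some 2) == "//") with _ | _
      · rfl
      · exact absurd ((pvSlice2_iff _).mp hb) h3

-- if everything before the first "//" is whitespace, the whitespace run ends at [] or "//"
lemma pvDrop_of_TU (c : List Char)
    (h : ∀ ch ∈ pvTU ['/', '/'] c, PySem.Chars.isspace ch = true) :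
    c.dropWhile PySem.Chars.isspace = [] ∨
      ['/', '/'] <+: c.dropWhile PySem.Chars.isspace := by
  induction c with
  | nil => exact Or.inl rfl
  | cons x t ih =>
    by_cases hp : ['/', '/'].isPrefixOf (x :: t) = true
    · have hx : x = '/' := by
        obtain ⟨u, hu⟩ := List.isPrefixOf_iff_prefix.mp hp
        exact (List.cons.injEq _ _ _ _ ▸ hu).1.symm
      have hsx : PySem.Chars.isspace x = false := by rw [hx]; decide
      rw [List.dropWhile_cons_of_neg (by simp [hsx])]
      exact Or.inr (List.isPrefixOf_iff_prefix.mp hp)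
    · rw [pvTU, if_neg hp] at h
      have hsx : PySem.Chars.isspace x = true := h x List.mem_cons_self
      rw [List.dropWhile_cons_of_pos hsx]
      exact ih (fun ch hch => h ch (List.mem_cons_of_mem _ hch))

-- and conversely
lemma pvTU_of_drop (c : List Char)
    (h : c.dropWhile PySem.Chars.isspace = [] ∨
      ['/', '/'] <+: c.dropWhile PySem.Chars.isspace) :
    ∀ ch ∈ pvTU ['/', '/'] c, PySem.Chars.isspace ch = true := by
  induction c with
  | nil => intro ch hch; simp [pvTU] at hch
  | cons x t ih =>
    by_cases hp : ['/', '/'].isPrefixOf (x :: t) = true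
    · intro ch hch
      rw [pvTU, if_pos hp] at hch
      simp at hch
    · rw [pvTU, if_neg hp]
      by_cases hsx : PySem.Chars.isspace x = true
      · rw [List.dropWhile_cons_of_pos hsx] at h
        intro ch hch
        rcases List.mem_cons.mp hch with rfl | hch
        · exact hsx
        · exact ih h ch hch
      · rw [List.dropWhile_cons_of_neg hsx] at h
        rcases h with h | h
        · simp at h
        · obtain ⟨u, hu⟩ := h
          exact absurd (List.isPrefixOf_iff_prefix.mpr ⟨u, hu⟩) hp

-- the closed-form line condition of D_ equals "kept by A with a whitespace-only value"
lemma pvJ_iff (l : String) :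
    (l.toList.filter (fun ch => !(ch == ' ')) ≠ [] ∧
      l.toList.filter (fun ch => !(ch == ' ')) ≠ ['\n'] ∧
      ¬ ['/', '/'] <+: l.toList.filter (fun ch => !(ch == ' ')) ∧
      ((l.toList.filter (fun ch => !(ch == ' '))).dropWhile PySem.Chars.isspace = [] ∨
        ['/', '/'] <+: (l.toList.filter (fun ch => !(ch == ' '))).dropWhile PySem.Chars.isspace))
    ↔ pvJunk l = true := by
  rw [pvFilter_eq, pvJunk, Bool.and_eq_true, Bool.not_eq_eq_eq_not, Bool.not_true]
  constructor
  · rintro ⟨h1, h2, h3, hw⟩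
    have hskip : pvSkipB l = false := (pvSkip_false_iff l).mpr ⟨h1, h2, h3⟩
    refine ⟨hskip, ?_⟩
    rw [PySem.Str.strIsspace_eq, PySem.Chars.strIsspace, Bool.and_eq_true]
    refine ⟨by simpa using (pvValF_facts l hskip).1, ?_⟩
    rw [pvValF_TU, List.all_eq_true]
    exact pvTU_of_drop _ hw
  · rintro ⟨hskip, hws⟩
    obtain ⟨h1, h2, h3⟩ := (pvSkip_false_iff l).mp hskip
    refine ⟨h1, h2, h3, pvDrop_of_TU _ ?_⟩
    rw [PySem.Str.strIsspace_eq, PySem.Chars.strIsspace, Bool.and_eq_true] at hws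
    have := hws.2
    rw [pvValF_TU, List.all_eq_true] at this
    exact this

-- D_ is "some line is junk"
lemma pvD_iff (lines : List String) (ourDict : List (String × Int)) :
    D_stepOne lines ourDict ↔ lines.any pvJunk = true := by
  rw [D_stepOne, List.any_eq_true]
  exact ⟨fun ⟨l, hl, h⟩ => ⟨l, hl, (pvJ_iff l).mp h⟩,
    fun ⟨l, hl, h⟩ => ⟨l, hl, (pvJ_iff l).mpr h⟩⟩

-- A's skipped lines all have a blank or comment-empty stored value
lemma pvSkip_dropB (s : String) (h : pvSkipB s = true) :
    (pvValF s == "" || PySem.Str.strIsspace (pvValF s)) = true := by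
  simp only [pvSkipB, Bool.or_eq_true, beq_iff_eq] at h
  rcases h with (hc | hc) | hc
  · have hv : pvValF s = "\n" := by rw [pvValF, hc]; decide
    rw [hv]; decide
  · have hv : pvValF s = "" := by rw [pvValF, hc]; decide
    rw [hv]; decide
  · have hpre : "//".toList <+: (pvClean s).toList := (pvSlice2_iff _).mp (by simpa using hc)
    have hv : pvValF s = "" := by
      apply String.toList_injective
      rw [pvValF_toList, if_pos ((PySem.Chars.isIn_iff_infix _ _).mpr hpre.isInfix)]
      exact pvTU_nil_of_prefix _ _ (by simp) hpre
    rw [hv]; decide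

-- outside the junk lines, A's keep test and B's keep test agree
lemma pvKeep_eq (s : String) (hj : pvJunk s = false) :
    (!pvSkipB s) = !(pvValF s == "" || PySem.Str.strIsspace (pvValF s)) := by
  cases hs : pvSkipB s with
  | true => rw [pvSkip_dropB s hs]
  | false =>
    have hws : PySem.Str.strIsspace (pvValF s) = false := by
      simpa [pvJunk, hs] using hj
    have hne : (pvValF s == "") = false := by
      rcases hb : (pvValF s == "") with _ | _
      · rfl
      · exact absurd (by rw [beq_iff_eq.mp hb]; rfl) (pvValF_facts s hs).1
    rw [hne, hws]; rfl

-- A's full per-line effect on the kept prefix: a skipped "\n" moves the EARLIEST "\n" entry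
-- of the prefix to its end; everything else appends or is dropped.
def pvNlSkip (s : String) : Bool := pvClean s == "\n"
def pvMoveNl (l : List String) : List String :=
  if "\n" ∈ l then l.erase "\n" ++ ["\n"] else l
def pvStepA (done : List String) (s : String) : List String :=
  if pvSkipB s = true then (if pvNlSkip s = true then pvMoveNl done else done)
  else done ++ [pvValF s]
-- B's per-line effect, with A's keep test (bridged to B's by pvKeep_eq)
def pvStepB (done : List String) (s : String) : List String :=
  if pvSkipB s = true then done else done ++ [pvValF s]

lemma pvSet_mid (done rest : List String) (x v : String) :
    PySem.List.pySetD (done ++ x :: rest) (done.length : Int) v = done ++ v :: rest := by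
  rw [PySem.List.pySetD_natCast, List.set_append_right _ _ (by omega)]
  simp

-- the loop invariant: A's loop is the fold of pvStepA over the input
lemma pvLoopGen (rem : List String) : ∀ (done : List String) (ctr : Int)
    (d : PySem.Dict String Int),
    (∀ v ∈ done, v.toList ≠ [] ∧ ¬ ("//".toList <+: v.toList)) →
    stepOneLoop rem ctr (done.length : Int) (done ++ rem) d = rem.foldl pvStepA done := by
  induction rem with
  | nil => intro done ctr d _; simp [stepOneLoop]
  | cons line rest ih =>
    intro done ctr d h1
    simp only [stepOneLoop, List.foldl_cons]
    rw [pvSet_mid,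
      show (PySem.Str.replace line " " "" == "\n" || PySem.Str.replace line " " "" == "" ||
        PySem.Str.slice (PySem.Str.replace line " " "") (some 0) (some 2) == "//") = pvSkipB line
      from rfl]
    by_cases hs : pvSkipB line = true
    · rw [if_pos hs, pvStepA, if_pos hs]
      have hmem : PySem.Str.replace line " " "" ∈ done ++ PySem.Str.replace line " " "" :: rest := by
        simp
      rw [PySem.List.remove?_eq_some_erase _ _ hmem, Option.getD_some, List.erase_append]
      by_cases hd : PySem.Str.replace line " " "" ∈ done
      · have hcnl : PySem.Str.replace line " " "" = "\n" := by
          have hs' := hs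
          simp only [pvSkipB, pvClean, Bool.or_eq_true, beq_iff_eq] at hs'
          rcases hs' with (h | h) | h
          · exact h
          · exact absurd (by simp [h]) ((h1 _ hd).1)
          · exact absurd ((pvSlice2_iff _).mp (by simpa using h)) ((h1 _ hd).2)
        rw [if_pos hd]
        have hnsk : pvNlSkip line = true := by simp [pvNlSkip, pvClean, hcnl]
        rw [if_pos hnsk, pvMoveNl, if_pos (hcnl ▸ hd), hcnl]
        have hshape : done.erase "\n" ++ "\n" :: rest = (done.erase "\n" ++ ["\n"]) ++ rest := by
          simp
        rw [hshape,
          show (done.length : Int) = ((done.erase "\n" ++ ["\n"]).length : Int) by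
            have hmem2 : "\n" ∈ done := hcnl ▸ hd
            have h0 : 0 < done.length := List.length_pos_of_mem hmem2
            simp [List.length_erase_of_mem hmem2]
            omega]
        refine ih _ ctr d ?_
        intro v hv
        rcases List.mem_append.mp hv with hv | hv
        · exact h1 v (List.mem_of_mem_erase hv)
        · simp only [List.mem_singleton] at hv; subst hv
          exact ⟨by decide, by decide⟩
      · rw [if_neg hd, List.erase_cons_head]
        have hres : (if pvNlSkip line = true then pvMoveNl done else done) = done := by
          split
          · rename_i hnsk
            have : "\n" ∉ done := by
              simp only [pvNlSkip, pvClean, beq_iff_eq] at hnsk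
              exact hnsk ▸ hd
            rw [pvMoveNl, if_neg this]
          · rfl
        rw [hres]
        exact ih done ctr d h1
    · rw [if_neg hs, pvStepA, if_neg hs]
      have hsf : pvSkipB line = false := by simpa using hs
      have hns2 : (if PySem.Str.isIn "//" (PySem.Str.replace line " " "") = true then
            PySem.List.pySetD (done ++ PySem.Str.replace line " " "" :: rest) (done.length : Int)
              (((PySem.Str.split? (PySem.Str.replace line " " "") "//").getD []).headD "")
          else done ++ PySem.Str.replace line " " "" :: rest)
          = done ++ pvValF line :: rest := by
        rw [pvValF, pvClean]
        split
        · rw [pvSet_mid]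
        · rfl
      rw [hns2]
      have key : ∀ (ctr' : Int) (d' : PySem.Dict String Int),
          stepOneLoop rest ctr' ((done.length : Int) + 1) (done ++ pvValF line :: rest) d' =
            rest.foldl pvStepA (done ++ [pvValF line]) := by
        intro ctr' d'
        have h1' : ∀ v ∈ done ++ [pvValF line], v.toList ≠ [] ∧ ¬ ("//".toList <+: v.toList) := by
          intro v hv
          rcases List.mem_append.mp hv with hv | hv
          · exact h1 v hv
          · simp only [List.mem_singleton] at hv; subst hv
            exact pvValF_facts line hsf
        have := ih (done ++ [pvValF line]) ctr' d' h1'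
        simpa using this
      split
      · exact key _ _
      · exact key _ _

lemma pvA_eq_fold (lines : List String) (ourDict : List (String × Int)) :
    stepOne lines ourDict = lines.foldl pvStepA [] := by
  rw [stepOne]
  have := pvLoopGen lines [] 0 ⟨ourDict⟩ (by simp)
  simpa using this

-- B's fold computes map/filter with B's keep test
lemma pvAlt_eq (lines : List String) (ourDict : List (String × Int)) :
    stepOne_alt lines ourDict =
      (lines.filter (fun s => !(pvValF s == "" || PySem.Str.strIsspace (pvValF s)))).map pvValF := by
  show lines.foldl _ [] = _
  suffices h : ∀ acc : List String, lines.foldl (fun out line =>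
      let s := PySem.Str.replace line " " ""
      let s := if PySem.Str.isIn "//" s then ((PySem.Str.split? s "//").getD []).headD "" else s
      if s == "" || PySem.Str.strIsspace s then out else out ++ [s]) acc =
      acc ++ (lines.filter (fun s => !(pvValF s == "" || PySem.Str.strIsspace (pvValF s)))).map pvValF by
    simpa using h []
  induction lines with
  | nil => intro acc; simp
  | cons line rest ih =>
    intro acc
    simp only [List.foldl_cons]
    rw [show (let s := PySem.Str.replace line " " ""
      let s := if PySem.Str.isIn "//" s then ((PySem.Str.split? s "//").getD []).headD "" else s
      if s == "" || PySem.Str.strIsspace s then acc else acc ++ [s]) =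
      (if pvValF line == "" || PySem.Str.strIsspace (pvValF line) then acc else acc ++ [pvValF line])
      from rfl]
    by_cases hd : (pvValF line == "" || PySem.Str.strIsspace (pvValF line)) = true
    · rw [if_pos hd, List.filter_cons_of_neg (by rw [hd]; decide), ih]
    · rw [if_neg hd, ih, List.filter_cons_of_pos (by simpa using hd)]
      simp

lemma pvFoldB_eq (l : List String) : ∀ (a : List String),
    l.foldl pvStepB a = a ++ (l.filter (fun s => !pvSkipB s)).map pvValF := by
  induction l with
  | nil => intro a; simp
  | cons s r ih =>
    intro a
    simp only [List.foldl_cons, pvStepB]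
    by_cases hs : pvSkipB s = true
    · rw [if_pos hs, List.filter_cons_of_neg (by simp [hs]), ih]
    · rw [if_neg hs, ih, List.filter_cons_of_pos (by simp [Bool.not_eq_true] at hs ⊢; exact hs)]
      simp

-- kept values are never "\n" when the line is not junk
lemma pvValF_ne_nl (s : String) (hs : pvSkipB s = false) (hj : pvJunk s = false) :
    pvValF s ≠ "\n" := by
  intro he
  have hws : PySem.Str.strIsspace (pvValF s) = false := by
    simpa [pvJunk, hs] using hj
  rw [he] at hws
  exact absurd hws (by decide)

-- without junk lines A's fold never has a "\n" entry to move, so it equals B's fold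
lemma pvNoJunk_eq (rem : List String) : ∀ (a : List String),
    (∀ s ∈ rem, pvJunk s = false) → "\n" ∉ a →
    rem.foldl pvStepA a = rem.foldl pvStepB a := by
  induction rem with
  | nil => intro a _ _; rfl
  | cons s r ih =>
    intro a hall hna
    simp only [List.foldl_cons, pvStepA, pvStepB]
    by_cases hs : pvSkipB s = true
    · rw [if_pos hs, if_pos hs]
      have hmv : (if pvNlSkip s = true then pvMoveNl a else a) = a := by
        split
        · rw [pvMoveNl, if_neg hna]
        · rfl
      rw [hmv]
      exact ih a (fun x hx => hall x (List.mem_cons_of_mem _ hx)) hna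
    · have hsf : pvSkipB s = false := by simpa using hs
      rw [if_neg hs, if_neg hs]
      refine ih _ (fun x hx => hall x (List.mem_cons_of_mem _ hx)) ?_
      intro hmem
      rcases List.mem_append.mp hmem with h | h
      · exact hna h
      · simp only [List.mem_singleton] at h
        exact pvValF_ne_nl s hsf (hall s List.mem_cons_self) h.symm

-- ====== tightness: inside D_ the outputs always differ ======
lemma pvMem_moveNl (l : List String) (v : String) : v ∈ pvMoveNl l ↔ v ∈ l := by
  rw [pvMoveNl]
  split
  · rename_i hm
    constructor
    · intro h
      rcases List.mem_append.mp h with h | h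
      · exact List.mem_of_mem_erase h
      · simp only [List.mem_singleton] at h; exact h ▸ hm
    · intro h
      by_cases hv : v = "\n"
      · exact List.mem_append_right _ (by simp [hv])
      · exact List.mem_append_left _ ((List.mem_erase_of_ne hv).mpr h)
  · exact Iff.rfl

-- a junk line plants a whitespace-only entry that A's fold never loses
lemma pvP_fold (rem : List String) : ∀ (a : List String),
    (rem.any pvJunk = true ∨ ∃ v ∈ a, PySem.Str.strIsspace v = true) →
    ∃ v ∈ rem.foldl pvStepA a, PySem.Str.strIsspace v = true := by
  induction rem with
  | nil =>
    intro a h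
    rcases h with h | h
    · simp at h
    · simpa using h
  | cons s r ih =>
    intro a h
    simp only [List.foldl_cons, pvStepA]
    by_cases hs : pvSkipB s = true
    · rw [if_pos hs]
      have hjs : pvJunk s = false := by simp [pvJunk, hs]
      have h' : r.any pvJunk = true ∨
          ∃ v ∈ (if pvNlSkip s = true then pvMoveNl a else a), PySem.Str.strIsspace v = true := by
        rcases h with h | ⟨v, hv, hws⟩
        · simp only [List.any_cons, hjs, Bool.false_or] at h
          exact Or.inl h
        · refine Or.inr ⟨v, ?_, hws⟩
          split
          · exact (pvMem_moveNl a v).mpr hv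
          · exact hv
      exact ih _ h'
    · rw [if_neg hs]
      have hsf : pvSkipB s = false := by simpa using hs
      refine ih _ ?_
      rcases h with h | ⟨v, hv, hws⟩
      · simp only [List.any_cons, Bool.or_eq_true] at h
        rcases h with hj | hr
        · refine Or.inr ⟨pvValF s, by simp, ?_⟩
          simpa [pvJunk, hsf] using hj
        · exact Or.inl hr
      · exact Or.inr ⟨v, List.mem_append_left _ hv, hws⟩

-- every entry of B's output fails the whitespace test
lemma pvAltWs (lines : List String) (ourDict : List (String × Int)) :
    ∀ v ∈ stepOne_alt lines ourDict, PySem.Str.strIsspace v = false := by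
  intro v hv
  rw [pvAlt_eq] at hv
  obtain ⟨s, hsmem, rfl⟩ := List.mem_map.mp hv
  have := (List.mem_filter.mp hsmem).2
  simp only [Bool.not_eq_eq_eq_not, Bool.not_true, Bool.or_eq_false_iff] at this
  exact this.2

-- ===== VERDICT (by name: the statement is the Claim_ definition above) =====
theorem stepOne_spec : Claim_unchanged_stepOne := by
  intro lines ourDict _hdom hnd
  have hall : ∀ s ∈ lines, pvJunk s = false := by
    intro s hs
    rcases hb : pvJunk s with _ | _
    · rfl
    · exact absurd ((pvD_iff lines ourDict).mpr (List.any_eq_true.mpr ⟨s, hs, hb⟩)) hnd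
  show stepOne lines ourDict = stepOne_alt lines ourDict
  rw [pvA_eq_fold, pvNoJunk_eq lines [] hall (by simp), pvFoldB_eq, pvAlt_eq,
    List.nil_append]
  exact congrArg (List.map pvValF) (List.filter_congr (fun x hx => pvKeep_eq x (hall x hx)))

set_option maxHeartbeats 2000000 in
theorem stepOne_changed : Claim_changed_stepOne := by
  unfold Claim_changed_stepOne; decide

theorem stepOne_tight : Claim_exact_stepOne := by
  intro lines ourDict _hdom hD heq
  obtain ⟨v, hv, hws⟩ := pvP_fold lines [] (Or.inl ((pvD_iff lines ourDict).mp hD))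
  rw [← pvA_eq_fold lines ourDict, heq] at hv
  rw [pvAltWs lines ourDict v hv] at hws
  exact Bool.false_ne_true hws
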